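-- pv_equiv track=rewrite | github.com/salimt/Courses- | University-of-Toronto-The Fundamentals/week4/dnaProcessing.py | is_valid_sequence
-- ===== SOURCE A (Python) =====
-- def is_valid_sequence(s):
--     """ (str) -> bool
--
--     The parameter is a potential DNA sequence. Return True if and
--     only if the DNA sequence is valid (that is, it contains no
--     characters other than 'A', 'T', 'C' and 'G').
--
--     >>> is_valid_sequence("ATTCCGGGA")
--     True
--     >>> is_valid_sequence("SALIMAAAA")
--     False
--     """
--     nucs = "ATCG"
--     counterL = []
--     total = 0
--     for i in s:
--         if i in nucs and not i in counterL:
--             total += 1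
--             counterL += i
--         elif i not in nucs: return False
--     return (total >= 4) and (nucs == "ATCG")
-- ===== SOURCE B (Python) =====
-- def is_valid_sequence(s):
--     return set(s) == set("ATCG")
-- ===== Notes on version B (the rewrite author's own statement) =====
-- stated objective: simpler
-- what changed: Replaced A's per-character loop with distinct-list accumulator, counter and early return by a single set construction over the input compared for equality with the set of the four nucleotides.
import Mathlib
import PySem

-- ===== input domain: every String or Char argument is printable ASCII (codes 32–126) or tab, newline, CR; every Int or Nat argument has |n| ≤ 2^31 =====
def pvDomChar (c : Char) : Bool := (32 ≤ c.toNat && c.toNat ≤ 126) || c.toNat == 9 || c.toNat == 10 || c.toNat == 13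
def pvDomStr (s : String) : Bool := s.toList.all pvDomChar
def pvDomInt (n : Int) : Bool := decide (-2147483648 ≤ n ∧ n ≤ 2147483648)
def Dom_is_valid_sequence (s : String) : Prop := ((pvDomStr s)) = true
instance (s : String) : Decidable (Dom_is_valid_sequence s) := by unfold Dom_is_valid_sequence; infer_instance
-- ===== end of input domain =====

-- B replaces A's per-character scan (distinct-list accumulator, counter, early return) with
-- one set construction and a set-equality test; objective: simpler.

-- ===== PORT A =====
-- the loop over s with state (counterL, total); 'i in nucs' on the single char i is char
-- membership in "ATCG".toList, 'counterL += i' appends the one character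
def isvLoopA : List Char → List Char → Int → Bool
  | [], _, total => decide (total ≥ 4) && (("ATCG" : String) == "ATCG")
  | i :: rest, counterL, total =>
    if ("ATCG".toList.contains i) && !(counterL.contains i) then
      isvLoopA rest (counterL ++ [i]) (total + 1)
    else if !("ATCG".toList.contains i) then false
    else isvLoopA rest counterL total

def is_valid_sequence (s : String) : Bool := isvLoopA s.toList [] 0

-- ===== PORT B =====
def is_valid_sequence_alt (s : String) : Bool :=
  PySem.Set.equal (PySem.Set.ofList s.toList) (PySem.Set.ofList "ATCG".toList)

-- ===== PRECONDITION & SPEC =====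
def Spec_is_valid_sequence (s : String) (out : Bool) : Prop := out = is_valid_sequence_alt s
instance (s : String) (out : Bool) : Decidable (Spec_is_valid_sequence s out) := by unfold Spec_is_valid_sequence; infer_instance

-- ===== CLAIM (what is proved, stated in full; the proofs are below) =====
def Claim_equal_is_valid_sequence : Prop := ∀ (s : String), Dom_is_valid_sequence s → Spec_is_valid_sequence s (is_valid_sequence s)

-- ===== LEMMAS AND PROOFS =====

-- "ATCG".toList as a plain char list (String.toList of a literal does not whnf-reduce)
lemma atcg_toList : "ATCG".toList = ['A','T','C','G'] := by simp

-- with counterL a nodup sublist of the four nucleotides and total = counterL.length,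
-- A's loop returns true iff every remaining char is a nucleotide and every nucleotide
-- is already collected or still to come
lemma isvLoopA_spec (l : List Char) : ∀ (cl : List Char) (total : Int),
    cl.Nodup → (∀ c ∈ cl, c ∈ "ATCG".toList) → total = cl.length →
    isvLoopA l cl total
      = (decide (∀ c ∈ l, c ∈ "ATCG".toList)
          && decide (∀ c ∈ "ATCG".toList, c ∈ cl ∨ c ∈ l)) := by
  induction l with
  | nil =>
    intro cl total hnd hsub ht
    have h4 : (total ≥ 4) ↔ (∀ c ∈ "ATCG".toList, c ∈ cl) := by
      constructor
      · intro hge c hc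
        by_contra hnc
        have hsub' : cl ⊆ ("ATCG".toList.erase c) := by
          intro x hx
          exact (List.mem_erase_of_ne (fun he => hnc (by rw [← he]; exact hx))).mpr (hsub x hx)
        have hsp := (List.subperm_of_subset hnd hsub').length_le
        have hlen : ("ATCG".toList.erase c).length = 3 := by
          rw [atcg_toList] at hc ⊢
          fin_cases hc <;> decide
        omega
      · intro hall
        have hnd4 : ("ATCG".toList).Nodup := by rw [atcg_toList]; decide
        have hle := (List.subperm_of_subset hnd4 hall).length_le
        have h4len : ("ATCG".toList).length = 4 := by rw [atcg_toList]; rfl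
        omega
    show (decide (total ≥ 4) && (("ATCG" : String) == "ATCG"))
        = (decide (∀ c ∈ ([] : List Char), c ∈ "ATCG".toList)
            && decide (∀ c ∈ "ATCG".toList, c ∈ cl ∨ c ∈ ([] : List Char)))
    have e1 : (("ATCG" : String) == "ATCG") = true := by simp
    have e2 : (decide (∀ c ∈ ([] : List Char), c ∈ "ATCG".toList)) = true := by simp
    rw [e1, Bool.and_true, e2, Bool.true_and]
    exact decide_eq_decide.mpr (h4.trans (by
      constructor
      · intro h c hc; exact Or.inl (h c hc)
      · intro h c hc; rcases h c hc with h' | h'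
        · exact h'
        · exact absurd h' (List.not_mem_nil)))
  | cons i rest ih =>
    intro cl total hnd hsub ht
    by_cases hin : i ∈ "ATCG".toList
    · have hinb : "ATCG".toList.contains i = true := by simpa using hin
      by_cases hcl : i ∈ cl
      · have hclb : cl.contains i = true := by simpa using hcl
        have hL : isvLoopA (i :: rest) cl total = isvLoopA rest cl total := by
          show (if ("ATCG".toList.contains i) && !(cl.contains i) then
                  isvLoopA rest (cl ++ [i]) (total + 1)
                else if !("ATCG".toList.contains i) then false
                else isvLoopA rest cl total) = _
          rw [hinb, hclb]
          rfl
        refine hL.trans ((ih cl total hnd hsub ht).trans ?_)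
        refine congr_arg₂ (· && ·) ?_ ?_
        · exact decide_eq_decide.mpr (by
            rw [List.forall_mem_cons]
            exact ⟨fun h => ⟨hin, h⟩, fun h => h.2⟩)
        · exact decide_eq_decide.mpr (by
            constructor
            · intro h c hc; rcases h c hc with h' | h'
              · exact Or.inl h'
              · exact Or.inr (List.mem_cons_of_mem _ h')
            · intro h c hc; rcases h c hc with h' | h'
              · exact Or.inl h'
              · rcases List.mem_cons.mp h' with rfl | h''
                · exact Or.inl hcl
                · exact Or.inr h'')
      · have hclb : cl.contains i = false := by simpa using hcl
        have hL : isvLoopA (i :: rest) cl total = isvLoopA rest (cl ++ [i]) (total + 1) := by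
          show (if ("ATCG".toList.contains i) && !(cl.contains i) then
                  isvLoopA rest (cl ++ [i]) (total + 1)
                else if !("ATCG".toList.contains i) then false
                else isvLoopA rest cl total) = _
          rw [hinb, hclb]
          rfl
        have hnd' : (cl ++ [i]).Nodup := by
          simp [List.nodup_append, hnd]
          exact fun a ha he => hcl (he ▸ ha)
        have hsub' : ∀ c ∈ cl ++ [i], c ∈ "ATCG".toList := by
          intro c hc
          rcases List.mem_append.mp hc with h' | h'
          · exact hsub c h'
          · rcases List.mem_singleton.mp h' with rfl; exact hin
        have ht' : total + 1 = ((cl ++ [i]).length : Int) := by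
          rw [List.length_append, List.length_singleton]
          push_cast
          omega
        refine hL.trans ((ih (cl ++ [i]) (total + 1) hnd' hsub' ht').trans ?_)
        refine congr_arg₂ (· && ·) ?_ ?_
        · exact decide_eq_decide.mpr (by
            rw [List.forall_mem_cons]
            exact ⟨fun h => ⟨hin, h⟩, fun h => h.2⟩)
        · exact decide_eq_decide.mpr (by
            constructor
            · intro h c hc; rcases h c hc with h' | h'
              · rcases List.mem_append.mp h' with h'' | h''
                · exact Or.inl h''
                · rcases List.mem_singleton.mp h'' with rfl
                  exact Or.inr (List.mem_cons_self)
              · exact Or.inr (List.mem_cons_of_mem _ h')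
            · intro h c hc; rcases h c hc with h' | h'
              · exact Or.inl (List.mem_append.mpr (Or.inl h'))
              · rcases List.mem_cons.mp h' with rfl | h''
                · exact Or.inl (List.mem_append.mpr (Or.inr (List.mem_singleton.mpr rfl)))
                · exact Or.inr h'')
    · have hinb : "ATCG".toList.contains i = false := by simpa using hin
      have hL : isvLoopA (i :: rest) cl total = false := by
        show (if ("ATCG".toList.contains i) && !(cl.contains i) then
                isvLoopA rest (cl ++ [i]) (total + 1)
              else if !("ATCG".toList.contains i) then false
              else isvLoopA rest cl total) = _
        rw [hinb]
        rfl
      have hr : decide (∀ c ∈ i :: rest, c ∈ "ATCG".toList) = false := by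
        apply decide_eq_false
        intro h
        exact hin (h i List.mem_cons_self)
      exact hL.trans (by rw [hr, Bool.false_and])

theorem is_valid_sequence_spec : Claim_equal_is_valid_sequence := by
  intro s _
  show isvLoopA s.toList [] 0
      = PySem.Set.equal (PySem.Set.ofList s.toList) (PySem.Set.ofList "ATCG".toList)
  refine (isvLoopA_spec s.toList [] 0 List.nodup_nil
      (fun c hc => absurd hc (List.not_mem_nil)) (by simp)).trans ?_
  apply Bool.eq_iff_iff.mpr
  simp only [Bool.and_eq_true, decide_eq_true_eq, PySem.Set.equal_iff,
    PySem.Set.mem_ofList, List.not_mem_nil, false_or]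
  constructor
  · rintro ⟨h1, h2⟩ x
    exact ⟨fun hx => h1 x hx, fun hx => h2 x hx⟩
  · intro h
    exact ⟨fun c hc => (h c).mp hc, fun c hc => (h c).mpr hc⟩
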